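-- pv_equiv track=rewrite | github.com/webel/Data-Mining | homework_3/facit.py | get_new_wedges_and_diff
-- ===== SOURCE A (Python) =====
-- def is_wedge(edge1, edge2):
--     """
--     Check if edge1 and edge2 form a wedge.
--     :param edge1:
--     :param edge2:
--     :return:
--     """
--     if edge1 != edge2:
--         for i in range(2):
--             for j in range(2):
--                 if edge1[i] == edge2[j]:
--                     return True
--     return False
--
-- def get_wedge(edge1, edge2):
--     """ Check if two edges forms a wedge, and if so returns the wedge.
--
--     :param edge1    : An edge on the form [u,v].
--     :param edge2    : An edge on the form [u,v].
--     :return         : Returns a wedge if the edges form a wedge, otherwise None. The wedge is given on the form (a,b,c), where a < c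
--     """
--     if is_wedge(edge1, edge2):
--         nodes = edge1 + edge2
--         connecting_node = -1
--         leaf_nodes = []
--         for n in nodes:
--             if nodes.count(n) > 1:
--                 connecting_node = n
--             else:
--                 leaf_nodes.append(n)
--
--         leaf_nodes.sort()
--
--         return tuple([leaf_nodes.pop(), connecting_node, leaf_nodes.pop()])
--     return None
--
-- def get_nof_deleted_wedges_for_edge(edge, deleted_edges):
--     """
--     Get the number of wedges formed by the edge and the edges in deleted_edges.
--     :param edge:
--     :param deleted_edges:
--     :return: A number of deleted wedges.
--     """
--     nof_deleted_wedges = 0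
--     for edge_i in deleted_edges:
--         if is_wedge(edge, edge_i):
--             nof_deleted_wedges += 1
--
--     return nof_deleted_wedges
--
-- def get_new_wedges_and_diff(edge_t, deleted_edges, edge_res):
--     """
--     Get new wedges and the diff in total wedges after additions and deletions.
--     :param edge_t:
--     :param deleted_edges:
--     :param edge_res:
--     :return: A list of new wedges and the difference in total wedges as an integer.
--     """
--     tot_wedges_diff = 0
--     seen = set()
--     seen.add(edge_t)
--     new_wedges = []
--     for edge_i in edge_res:
--         if edge_i is not None and edge_i not in seen:
--             seen.add(edge_i)
--
--             tot_wedges_diff -= get_nof_deleted_wedges_for_edge(edge_i, deleted_edges)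
--
--             wedge = get_wedge(edge_i, edge_t)
--
--             if wedge is not None:
--                 new_wedges.append(wedge)
--
--     tot_wedges_diff += len(new_wedges)
--     return new_wedges, tot_wedges_diff
-- ===== SOURCE B (Python) =====
-- from collections import Counter
--
-- def get_new_wedges_and_diff(edge_t, deleted_edges, edge_res):
--     nodes = []
--     pairs = []
--     for a, b in deleted_edges:
--         nodes.append(a)
--         if a != b:
--             nodes.append(b)
--             pairs.append((a, b) if a <= b else (b, a))
--     incid = Counter(nodes)
--     pair_cnt = Counter(pairs)
--     exact = Counter(deleted_edges)
--
--     x, y = edge_t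
--     seen = {edge_t}
--     new_wedges = []
--     deleted_total = 0
--     for e in edge_res:
--         if e is None or e in seen:
--             continue
--         seen.add(e)
--         u, v = e
--         if u == v:
--             share = incid[u]
--         else:
--             share = incid[u] + incid[v] - pair_cnt[(u, v) if u <= v else (v, u)]
--         deleted_total += share - exact[e]
--         common = {u, v} & {x, y}
--         if u != v and x != y and len(common) == 1:
--             c = common.pop()
--             p = v if u == c else u
--             q = y if x == c else x
--             new_wedges.append((max(p, q), c, min(p, q)))
--     return new_wedges, len(new_wedges) - deleted_total
-- ===== Notes on version B (the rewrite author's own statement) =====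
-- stated objective: alternative
-- what changed: A rescans deleted_edges once per result edge (and derives each wedge by counting/sorting a 4-node list); B builds node-incidence, normalized-pair and exact-edge Counters over deleted_edges once and answers each edge's deleted-wedge count in O(1) by inclusion-exclusion, computing the wedge with edge_t directly from the single shared node.
-- outside the precondition, e.g. on get_new_wedges_and_diff((1, 2), [], [(2, 1)]): A raises IndexError, B returns ([], 0); on get_new_wedges_and_diff((1, 2), [], [(1, 1)]): A raises IndexError, B returns ([], 0)
import Mathlib
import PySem

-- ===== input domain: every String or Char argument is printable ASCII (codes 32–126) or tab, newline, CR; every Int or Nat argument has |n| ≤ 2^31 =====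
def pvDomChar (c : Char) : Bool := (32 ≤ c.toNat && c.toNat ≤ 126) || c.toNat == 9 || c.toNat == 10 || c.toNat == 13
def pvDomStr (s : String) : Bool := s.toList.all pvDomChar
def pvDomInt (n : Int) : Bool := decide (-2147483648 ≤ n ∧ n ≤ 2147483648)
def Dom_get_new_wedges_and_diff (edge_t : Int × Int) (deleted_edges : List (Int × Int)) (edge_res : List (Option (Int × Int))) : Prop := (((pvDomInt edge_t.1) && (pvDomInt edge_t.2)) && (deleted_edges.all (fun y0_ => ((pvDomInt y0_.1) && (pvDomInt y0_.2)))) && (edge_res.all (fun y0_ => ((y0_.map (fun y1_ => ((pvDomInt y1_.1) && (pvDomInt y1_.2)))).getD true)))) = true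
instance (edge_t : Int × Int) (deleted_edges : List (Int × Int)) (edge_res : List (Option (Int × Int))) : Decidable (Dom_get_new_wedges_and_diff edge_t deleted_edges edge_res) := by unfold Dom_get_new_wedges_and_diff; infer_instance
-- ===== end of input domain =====

-- B replaces A's per-result-edge rescans of deleted_edges by Counter lookups
-- (inclusion–exclusion over node incidences) and computes each wedge directly;
-- equivalence is claimed on Pre_, the inputs where the Python A does not raise.

-- ===== PORT A =====
def is_wedge (edge1 edge2 : Int × Int) : Bool :=
  if edge1 ≠ edge2 then
    if edge1.1 = edge2.1 then true
    else if edge1.1 = edge2.2 then true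
    else if edge1.2 = edge2.1 then true
    else if edge1.2 = edge2.2 then true
    else false
  else false

-- outer `none` marks exactly where Python's leaf_nodes.pop() raises IndexError
def get_wedge (edge1 edge2 : Int × Int) : Option (Option (Int × Int × Int)) :=
  if is_wedge edge1 edge2 then
    let nodes : List Int := [edge1.1, edge1.2, edge2.1, edge2.2]
    let st := nodes.foldl (fun (st : Int × List Int) n =>
      if PySem.List.count nodes n > 1 then (n, st.2) else (st.1, st.2 ++ [n])) (-1, [])
    let leaves := PySem.List.sorted st.2 (fun x => x) false
    match PySem.List.pop? leaves (-1) with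
    | none => none
    | some (a, rest) =>
      match PySem.List.pop? rest (-1) with
      | none => none
      | some (b, _) => some (some (a, st.1, b))
  else some none

def get_nof_deleted_wedges_for_edge (edge : Int × Int) (deleted_edges : List (Int × Int)) : Int :=
  deleted_edges.foldl (fun acc edge_i => if is_wedge edge edge_i then acc + 1 else acc) 0

-- the body of A's `for edge_i in edge_res` loop
def pvAStep (edge_t : Int × Int) (deleted_edges : List (Int × Int))
    (st : Option (PySem.Set (Int × Int) × Int × List (Int × Int × Int)))
    (edge_i : Option (Int × Int)) :
    Option (PySem.Set (Int × Int) × Int × List (Int × Int × Int)) :=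
  match st, edge_i with
  | none, _ => none
  | some s, none => some s
  | some (seen, diff, nw), some e =>
    if PySem.Set.contains seen e then some (seen, diff, nw)
    else
      let seen' := PySem.Set.add seen e
      let diff' := diff - get_nof_deleted_wedges_for_edge e deleted_edges
      match get_wedge e edge_t with
      | none => none
      | some none => some (seen', diff', nw)
      | some (some w) => some (seen', diff', nw ++ [w])

def get_new_wedges_and_diff (edge_t : Int × Int) (deleted_edges : List (Int × Int)) (edge_res : List (Option (Int × Int))) : (List (Int × Int × Int)) × Int :=
  let st := edge_res.foldl (pvAStep edge_t deleted_edges)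
    (some (PySem.Set.add PySem.Set.empty edge_t, 0, []))
  match st with
  | none => ([], 0)           -- unreachable under Pre_ (Python raises IndexError here)
  | some (_, diff, nw) => (nw, diff + PySem.List.len nw)

-- ===== PORT B =====
def pvMax2 (a b : Int) : Int := if a ≥ b then a else b  -- Python max(a, b) on ints
def pvMin2 (a b : Int) : Int := if a ≤ b then a else b  -- Python min(a, b) on ints

-- the body of B's loop over deleted_edges building the node/pair lists
def pvBCountStep (st : List Int × List (Int × Int)) (d : Int × Int) :
    List Int × List (Int × Int) :=
  let st1 := (st.1 ++ [d.1], st.2)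
  if d.1 ≠ d.2 then
    (st1.1 ++ [d.2], st1.2 ++ [if d.1 ≤ d.2 then (d.1, d.2) else (d.2, d.1)])
  else st1

-- the body of B's `for e in edge_res` loop
def pvBStep (x y : Int) (incid : PySem.Dict Int Int) (pair_cnt : PySem.Dict (Int × Int) Int)
    (exact : PySem.Dict (Int × Int) Int)
    (st : PySem.Set (Int × Int) × List (Int × Int × Int) × Int)
    (ei : Option (Int × Int)) :
    PySem.Set (Int × Int) × List (Int × Int × Int) × Int :=
  match ei with
  | none => st
  | some e =>
    if PySem.Set.contains st.1 e then st
    else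
      let seen' := PySem.Set.add st.1 e
      let u := e.1
      let v := e.2
      let share : Int :=
        if u = v then incid.getD u 0
        else incid.getD u 0 + incid.getD v 0 - pair_cnt.getD (if u ≤ v then (u, v) else (v, u)) 0
      let dtot := st.2.2 + (share - exact.getD e 0)
      let common := PySem.Set.inter (PySem.Set.ofList [u, v]) [x, y]
      if u ≠ v ∧ x ≠ y ∧ common.length = 1 then
        let c := common.headD 0        -- common.pop() of a one-element set
        let p := if u = c then v else u
        let q := if x = c then y else x
        (seen', st.2.1 ++ [(pvMax2 p q, c, pvMin2 p q)], dtot)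
      else (seen', st.2.1, dtot)

def get_new_wedges_and_diff_alt (edge_t : Int × Int) (deleted_edges : List (Int × Int)) (edge_res : List (Option (Int × Int))) : (List (Int × Int × Int)) × Int :=
  let np := deleted_edges.foldl pvBCountStep ([], [])
  let incid := PySem.Dict.counter np.1
  let pair_cnt := PySem.Dict.counter np.2
  let exact := PySem.Dict.counter deleted_edges
  let fin := edge_res.foldl (pvBStep edge_t.1 edge_t.2 incid pair_cnt exact)
    (PySem.Set.add PySem.Set.empty edge_t, [], 0)
  (fin.2.1, PySem.List.len fin.2.1 - fin.2.2)

-- ===== PRECONDITION & SPEC =====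
-- Pre_ excludes exactly the inputs on which the Python A raises IndexError
-- (leaf_nodes.pop() in get_wedge): some non-None result edge e forms a "wedge" with
-- edge_t while e or edge_t is a self-loop or e is edge_t reversed, so that fewer than
-- two leaf nodes remain.
def pvWedgeBad (t e : Int × Int) : Bool :=
  decide (e ≠ t) &&
  (decide (e.1 = t.1) || decide (e.1 = t.2) || decide (e.2 = t.1) || decide (e.2 = t.2)) &&
  (decide (e.1 = e.2) || decide (t.1 = t.2) || (decide (e.1 = t.2) && decide (e.2 = t.1)))

def Pre_get_new_wedges_and_diff (edge_t : Int × Int) (deleted_edges : List (Int × Int)) (edge_res : List (Option (Int × Int))) : Prop :=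
  (edge_res.all (fun p => (p.map (fun e => !pvWedgeBad edge_t e)).getD true)) = true

instance (edge_t : Int × Int) (deleted_edges : List (Int × Int)) (edge_res : List (Option (Int × Int))) : Decidable (Pre_get_new_wedges_and_diff edge_t deleted_edges edge_res) := by unfold Pre_get_new_wedges_and_diff; infer_instance

def pvWitness_get_new_wedges_and_diff : (Int × Int) × (List (Int × Int)) × (List (Option (Int × Int))) :=
  ((1, 2), [(2, 3), (4, 5)], [some (2, 4), none, some (5, 6), some (2, 4)])

def Spec_get_new_wedges_and_diff (edge_t : Int × Int) (deleted_edges : List (Int × Int)) (edge_res : List (Option (Int × Int))) (out : (List (Int × Int × Int)) × Int) : Prop := out = get_new_wedges_and_diff_alt edge_t deleted_edges edge_res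
instance (edge_t : Int × Int) (deleted_edges : List (Int × Int)) (edge_res : List (Option (Int × Int))) (out : (List (Int × Int × Int)) × Int) : Decidable (Spec_get_new_wedges_and_diff edge_t deleted_edges edge_res out) := by unfold Spec_get_new_wedges_and_diff; infer_instance

-- ===== CLAIM (what is proved, stated in full; the proofs are below) =====
def Claim_equal_get_new_wedges_and_diff : Prop := ∀ (edge_t : Int × Int) (deleted_edges : List (Int × Int)) (edge_res : List (Option (Int × Int))), Dom_get_new_wedges_and_diff edge_t deleted_edges edge_res → Pre_get_new_wedges_and_diff edge_t deleted_edges edge_res → Spec_get_new_wedges_and_diff edge_t deleted_edges edge_res (get_new_wedges_and_diff edge_t deleted_edges edge_res)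

-- ===== LEMMAS AND PROOFS =====
theorem get_new_wedges_and_diff_witness_ok :
    Dom_get_new_wedges_and_diff pvWitness_get_new_wedges_and_diff.1 pvWitness_get_new_wedges_and_diff.2.1 pvWitness_get_new_wedges_and_diff.2.2 ∧
    Pre_get_new_wedges_and_diff pvWitness_get_new_wedges_and_diff.1 pvWitness_get_new_wedges_and_diff.2.1 pvWitness_get_new_wedges_and_diff.2.2 := by
  decide

-- proof-side descriptions of the node/pair lists B accumulates over deleted_edges
def pvNodes (D : List (Int × Int)) : List Int :=
  D.flatMap (fun d => d.1 :: (if d.1 = d.2 then [] else [d.2]))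
def pvPairs (D : List (Int × Int)) : List (Int × Int) :=
  D.flatMap (fun d => if d.1 = d.2 then [] else [if d.1 ≤ d.2 then (d.1, d.2) else (d.2, d.1)])
def containsNode (x : Int) (d : Int × Int) : Bool := decide (d.1 = x) || decide (d.2 = x)

theorem pvNodes_cons (a b : Int) (D : List (Int × Int)) :
    pvNodes ((a, b) :: D) = (a :: (if a = b then [] else [b])) ++ pvNodes D := rfl
theorem pvPairs_cons (a b : Int) (D : List (Int × Int)) :
    pvPairs ((a, b) :: D) =
      (if a = b then [] else [if a ≤ b then (a, b) else (b, a)]) ++ pvPairs D := rfl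

theorem pvBCountStep_fold (D : List (Int × Int)) (ns : List Int) (ps : List (Int × Int)) :
    D.foldl pvBCountStep (ns, ps) = (ns ++ pvNodes D, ps ++ pvPairs D) := by
  induction D generalizing ns ps with
  | nil => simp [pvNodes, pvPairs]
  | cons d D ih =>
    obtain ⟨a, b⟩ := d
    simp only [List.foldl_cons, pvBCountStep, pvNodes_cons, pvPairs_cons]
    by_cases h : a = b <;> simp [h, ih]

theorem norm_eq_iff (a b u v : Int) :
    ((if a ≤ b then ((a:Int), b) else (b, a)) = if u ≤ v then ((u:Int), v) else (v, u)) ↔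
      ((a = u ∧ b = v) ∨ (a = v ∧ b = u)) := by
  split_ifs <;> simp only [Prod.mk.injEq] <;> omega

theorem node_contrib (a b x : Int) :
    List.count x (a :: (if a = b then [] else [b])) =
      (if containsNode x (a, b) = true then 1 else 0) := by
  by_cases h : a = b
  · subst h
    simp only [if_pos rfl, containsNode]
    by_cases h1 : a = x <;> simp [h1]
  · simp only [if_neg h, containsNode]
    by_cases h1 : a = x <;> by_cases h2 : b = x <;>
      simp [h1, h2, List.count_cons] <;> omega

theorem pair_contrib (a b u v : Int) :
    List.count (if u ≤ v then ((u:Int), v) else (v, u))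
        (if a = b then [] else [if a ≤ b then ((a:Int), b) else (b, a)]) =
      (if (containsNode u (a, b) && containsNode v (a, b) && decide (u ≠ v)) = true
       then 1 else 0) := by
  by_cases h : a = b
  · rw [if_pos h, List.count_nil]
    have hc : ¬ (containsNode u (a, b) && containsNode v (a, b) && decide (u ≠ v)) = true := by
      simp only [containsNode, Bool.and_eq_true, Bool.or_eq_true, decide_eq_true_eq, ne_eq]
      omega
    rw [if_neg hc]
  · rw [if_neg h]
    have hcnt : List.count (if u ≤ v then ((u:Int), v) else (v, u))
        [if a ≤ b then ((a:Int), b) else (b, a)] =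
        if ((a = u ∧ b = v) ∨ (a = v ∧ b = u)) then 1 else 0 := by
      by_cases hx : (a = u ∧ b = v) ∨ (a = v ∧ b = u)
      · rw [if_pos hx, (norm_eq_iff a b u v).mpr hx]
        simp
      · rw [if_neg hx]
        have hne : ¬ ((if a ≤ b then ((a:Int), b) else (b, a)) =
            (if u ≤ v then ((u:Int), v) else (v, u))) :=
          fun hh => hx ((norm_eq_iff a b u v).mp hh)
        simp [List.count_cons, hne]
    rw [hcnt]
    have hiff : ((a = u ∧ b = v) ∨ (a = v ∧ b = u)) ↔
        ((containsNode u (a, b) && containsNode v (a, b) && decide (u ≠ v)) = true) := by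
      simp only [containsNode, Bool.and_eq_true, Bool.or_eq_true, decide_eq_true_eq, ne_eq]
      constructor <;> intro <;> omega
    rw [if_congr hiff rfl rfl]

theorem count_pvNodes (D : List (Int × Int)) (x : Int) :
    (pvNodes D).count x = D.countP (fun d => containsNode x d) := by
  induction D with
  | nil => simp [pvNodes]
  | cons d D ih =>
    obtain ⟨a, b⟩ := d
    rw [pvNodes_cons, List.count_append, node_contrib, ih]
    simp only [List.countP_cons]
    omega

theorem count_pvPairs (D : List (Int × Int)) (u v : Int) :
    (pvPairs D).count (if u ≤ v then (u, v) else (v, u)) =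
      D.countP (fun d => containsNode u d && containsNode v d && decide (u ≠ v)) := by
  induction D with
  | nil => simp [pvPairs]
  | cons d D ih =>
    obtain ⟨a, b⟩ := d
    rw [pvPairs_cons, List.count_append, pair_contrib, ih]
    simp only [List.countP_cons]
    omega

theorem is_wedge_eq_true_iff (e d : Int × Int) :
    is_wedge e d = true ↔ (d ≠ e ∧ (containsNode e.1 d || containsNode e.2 d) = true) := by
  simp only [is_wedge, containsNode, ne_eq, Prod.ext_iff]
  split_ifs <;> simp_all <;> omega

theorem is_wedge_eq (e d : Int × Int) :
    is_wedge e d = (decide (d ≠ e) && (containsNode e.1 d || containsNode e.2 d)) := by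
  rw [Bool.eq_iff_iff, is_wedge_eq_true_iff]
  simp

theorem countP_or_and {α : Type} (p q : α → Bool) (D : List α) :
    D.countP (fun d => p d || q d) + D.countP (fun d => p d && q d) =
      D.countP p + D.countP q := by
  induction D with
  | nil => simp
  | cons d D ih =>
    by_cases hp : p d <;> by_cases hq : q d <;> simp [List.countP_cons, hp, hq] <;> omega

theorem countP_ne_and (e : Int × Int) (p : Int × Int → Bool) (he : p e = true)
    (D : List (Int × Int)) :
    D.countP (fun d => decide (d ≠ e) && p d) + D.count e = D.countP p := by
  induction D with
  | nil => simp
  | cons d D ih =>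
    by_cases hd : d = e
    · subst hd; simp [List.countP_cons, he] at *; omega
    · by_cases hp : p d <;> simp [List.countP_cons, List.count_cons, hd, hp] at * <;> omega

-- A's per-edge rescan of deleted_edges equals B's inclusion-exclusion over the counters
theorem share_eq (del : List (Int × Int)) (u v : Int) :
    get_nof_deleted_wedges_for_edge (u, v) del =
      (if u = v then ((PySem.Dict.counter (pvNodes del)).getD u 0 : Int)
       else (PySem.Dict.counter (pvNodes del)).getD u 0
            + (PySem.Dict.counter (pvNodes del)).getD v 0
            - (PySem.Dict.counter (pvPairs del)).getD
                (if u ≤ v then (u, v) else (v, u)) 0)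
      - (PySem.Dict.counter del).getD (u, v) 0 := by
  rw [get_nof_deleted_wedges_for_edge, PySem.List.foldl_if_add_one]
  rw [PySem.Dict.getD_counter, PySem.Dict.getD_counter, PySem.Dict.getD_counter,
    PySem.Dict.getD_counter]
  rw [count_pvNodes, count_pvNodes, count_pvPairs]
  have hcong : del.countP (fun d => is_wedge (u, v) d) =
      del.countP (fun d => decide (d ≠ (u, v)) && (containsNode u d || containsNode v d)) := by
    apply List.countP_congr
    intro d _
    rw [is_wedge_eq (u, v) d]
  have hne := countP_ne_and (u, v) (fun d => containsNode u d || containsNode v d)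
    (by simp [containsNode]) del
  by_cases huv : u = v
  · subst huv
    have hself : del.countP (fun d => containsNode u d || containsNode u d) =
        del.countP (fun d => containsNode u d) := by
      apply List.countP_congr; intro d _; simp
    simp only [hcong]
    rw [hself] at hne
    push_cast
    omega
  · have hand : del.countP (fun d => containsNode u d && containsNode v d && decide (u ≠ v)) =
        del.countP (fun d => containsNode u d && containsNode v d) := by
      apply List.countP_congr; intro d _; simp [huv]
    have hor := countP_or_and (fun d => containsNode u d) (fun d => containsNode v d) del
    simp only [if_neg huv, hcong]
    rw [hand]
    omega

-- B's computation of one wedge, as an expression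
def pvBWedge (x y u v : Int) : Option (Int × Int × Int) :=
  let common := PySem.Set.inter (PySem.Set.ofList [u, v]) [x, y]
  if u ≠ v ∧ x ≠ y ∧ common.length = 1 then
    let c := common.headD 0
    let p := if u = c then v else u
    let q := if x = c then y else x
    some (pvMax2 p q, c, pvMin2 p q)
  else none

theorem common_eval (u v x y : Int) (huv : u ≠ v) :
    PySem.Set.inter (PySem.Set.ofList [u, v]) [x, y] =
      (if u = x ∨ u = y then [u] else []) ++ (if v = x ∨ v = y then [v] else []) := by
  have h0 : PySem.Set.ofList [u, v] = [u, v] := by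
    simp [PySem.Set.ofList, PySem.Set.add, PySem.Set.contains, PySem.Set.empty] <;> omega
  rw [show PySem.Set.inter (PySem.Set.ofList [u, v]) [x, y] =
      (PySem.Set.ofList [u, v]).filter (fun a => PySem.Set.contains [x, y] a) from rfl, h0]
  by_cases h1 : u = x ∨ u = y <;> by_cases h2 : v = x ∨ v = y <;>
    simp_all [PySem.Set.contains, List.filter_nil]

theorem sorted_two (a b : Int) :
    PySem.List.sorted [a, b] (fun x => x) false = if a ≤ b then [a, b] else [b, a] := by
  by_cases h : a ≤ b
  · rw [if_pos h]
    apply PySem.List.sorted_eq_self_of_pairwise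
    simp [List.pairwise_cons]
    omega
  · rw [if_neg h]
    apply PySem.List.sorted_id_eq_of_perm_of_pairwise
    · exact List.Perm.swap a b []
    · simp [List.pairwise_cons]
      omega

theorem wedge_eq (x y u v : Int) (hb : pvWedgeBad (x, y) (u, v) = false) :
    get_wedge (u, v) (x, y) = some (pvBWedge x y u v) := by
  by_cases hw : is_wedge (u, v) (x, y) = true
  · -- a genuine wedge: exactly one shared node, two distinct leaves
    have hprop := (is_wedge_eq_true_iff (u, v) (x, y)).mp hw
    simp only [containsNode, ne_eq, Prod.ext_iff, Bool.or_eq_true, decide_eq_true_eq] at hprop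
    obtain ⟨hne, hsh⟩ := hprop
    have hnb : ¬ (u = v ∨ x = y ∨ (u = y ∧ v = x)) := by
      intro hor
      have : pvWedgeBad (x, y) (u, v) = true := by
        simp only [pvWedgeBad, ne_eq, Prod.ext_iff, Bool.and_eq_true, Bool.or_eq_true,
          decide_eq_true_eq]
        refine ⟨⟨by tauto, by tauto⟩, by tauto⟩
      rw [hb] at this; exact absurd this (by simp)
    push_neg at hnb
    obtain ⟨huv, hxy, hrev⟩ := hnb
    rcases hsh with (hxu | hyu) | (hxv | hyv)
    · -- shared node u (x = u); leaves v and y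
      have hxu' : u = x := hxu.symm
      subst hxu'
      have hyv : ¬ y = v := fun hh => hne ⟨rfl, hh⟩
      have hcommon : PySem.Set.inter (PySem.Set.ofList [u, v]) [u, y] = [u] := by
        rw [common_eval u v u y huv]
        have h1 : u = u ∨ u = y := Or.inl rfl
        have h2 : ¬ (v = u ∨ v = y) := by omega
        simp [h1, h2]
      have hvu : ¬ v = u := by omega
      have hyu : ¬ y = u := by omega
      have hvy : ¬ v = y := by omega
      have huy : ¬ u = y := by omega
      have huv' : ¬ u = v := huv
      rw [get_wedge, if_pos hw]
      simp only [List.foldl_cons, List.foldl_nil, PySem.List.count_eq, List.count_cons,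
        List.count_nil, beq_iff_eq, hvu, hyu, hvy, hyv, huy, huv']
      norm_num
      rw [sorted_two]
      by_cases hle : v ≤ y
      · rw [if_pos hle]
        show some (some (y, u, v)) = some (pvBWedge u y u v)
        simp only [pvBWedge, hcommon]
        rw [if_pos ⟨huv, hxy, rfl⟩]
        simp only [List.headD_cons, eq_self_iff_true, if_true, pvMax2, pvMin2]
        rw [if_neg (by omega : ¬ v ≥ y), if_pos hle]
      · rw [if_neg hle]
        show some (some (v, u, y)) = some (pvBWedge u y u v)
        simp only [pvBWedge, hcommon]
        rw [if_pos ⟨huv, hxy, rfl⟩]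
        simp only [List.headD_cons, eq_self_iff_true, if_true, pvMax2, pvMin2]
        rw [if_pos (by omega : v ≥ y), if_neg (by omega : ¬ v ≤ y)]
    · -- shared node u (y = u); leaves v and x
      have hyu' : u = y := hyu.symm
      subst hyu'
      have hvx : ¬ v = x := fun hh => hrev rfl hh
      have hcommon : PySem.Set.inter (PySem.Set.ofList [u, v]) [x, u] = [u] := by
        rw [common_eval u v x u huv]
        have h1 : u = x ∨ u = u := Or.inr rfl
        have h2 : ¬ (v = x ∨ v = u) := by omega
        simp [h1, h2]
      have hvu : ¬ v = u := by omega
      have hxu : ¬ x = u := fun hh => hxy hh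
      have hux : ¬ u = x := by omega
      have hxv : ¬ x = v := by omega
      have huv' : ¬ u = v := huv
      rw [get_wedge, if_pos hw]
      simp only [List.foldl_cons, List.foldl_nil, PySem.List.count_eq, List.count_cons,
        List.count_nil, beq_iff_eq, hvu, hxu, hux, hxv, hvx, huv']
      norm_num
      rw [sorted_two]
      by_cases hle : v ≤ x
      · rw [if_pos hle]
        show some (some (x, u, v)) = some (pvBWedge x u u v)
        simp only [pvBWedge, hcommon]
        rw [if_pos ⟨huv, hxy, rfl⟩]
        simp only [List.headD_cons, eq_self_iff_true, if_true, if_neg hxu, pvMax2, pvMin2]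
        rw [if_neg (by omega : ¬ v ≥ x), if_pos hle]
      · rw [if_neg hle]
        show some (some (v, u, x)) = some (pvBWedge x u u v)
        simp only [pvBWedge, hcommon]
        rw [if_pos ⟨huv, hxy, rfl⟩]
        simp only [List.headD_cons, eq_self_iff_true, if_true, if_neg hxu, pvMax2, pvMin2]
        rw [if_pos (by omega : v ≥ x), if_neg (by omega : ¬ v ≤ x)]
    · -- shared node v (x = v); leaves u and y
      have hxv' : v = x := hxv.symm
      subst hxv'
      have huy : ¬ u = y := fun hh => hrev hh rfl
      have hcommon : PySem.Set.inter (PySem.Set.ofList [u, v]) [v, y] = [v] := by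
        rw [common_eval u v v y huv]
        have h1 : ¬ (u = v ∨ u = y) := by omega
        have h2 : v = v ∨ v = y := Or.inl rfl
        simp [h1, h2]
      have huv' : ¬ u = v := huv
      have hvu : ¬ v = u := by omega
      have hyu : ¬ y = u := by omega
      have hyv : ¬ y = v := fun hh => hxy hh.symm
      have hvy : ¬ v = y := by omega
      rw [get_wedge, if_pos hw]
      simp only [List.foldl_cons, List.foldl_nil, PySem.List.count_eq, List.count_cons,
        List.count_nil, beq_iff_eq, huv', hvu, hyu, hyv, hvy, huy]
      norm_num
      rw [sorted_two]
      by_cases hle : u ≤ y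
      · rw [if_pos hle]
        show some (some (y, v, u)) = some (pvBWedge v y u v)
        simp only [pvBWedge, hcommon]
        rw [if_pos ⟨huv, hxy, rfl⟩]
        simp only [List.headD_cons, if_neg huv', eq_self_iff_true, if_true, pvMax2, pvMin2]
        rw [if_neg (by omega : ¬ u ≥ y), if_pos hle]
      · rw [if_neg hle]
        show some (some (u, v, y)) = some (pvBWedge v y u v)
        simp only [pvBWedge, hcommon]
        rw [if_pos ⟨huv, hxy, rfl⟩]
        simp only [List.headD_cons, if_neg huv', eq_self_iff_true, if_true, pvMax2, pvMin2]
        rw [if_pos (by omega : u ≥ y), if_neg (by omega : ¬ u ≤ y)]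
    · -- shared node v (y = v); leaves u and x
      have hyv' : v = y := hyv.symm
      subst hyv'
      have hxu : ¬ x = u := fun hh => hne ⟨hh, rfl⟩
      have hcommon : PySem.Set.inter (PySem.Set.ofList [u, v]) [x, v] = [v] := by
        rw [common_eval u v x v huv]
        have h1 : ¬ (u = x ∨ u = v) := by omega
        have h2 : v = x ∨ v = v := Or.inr rfl
        simp [h1, h2]
      have huv' : ¬ u = v := huv
      have hvu : ¬ v = u := by omega
      have hux : ¬ u = x := by omega
      have hxv : ¬ x = v := fun hh => hxy hh
      have hvx : ¬ v = x := by omega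
      rw [get_wedge, if_pos hw]
      simp only [List.foldl_cons, List.foldl_nil, PySem.List.count_eq, List.count_cons,
        List.count_nil, beq_iff_eq, huv', hvu, hux, hxu, hxv, hvx]
      norm_num
      rw [sorted_two]
      by_cases hle : u ≤ x
      · rw [if_pos hle]
        show some (some (x, v, u)) = some (pvBWedge x v u v)
        simp only [pvBWedge, hcommon]
        rw [if_pos ⟨huv, hxy, rfl⟩]
        simp only [List.headD_cons, if_neg huv', if_neg hxv, pvMax2, pvMin2]
        rw [if_neg (by omega : ¬ u ≥ x), if_pos hle]
      · rw [if_neg hle]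
        show some (some (u, v, x)) = some (pvBWedge x v u v)
        simp only [pvBWedge, hcommon]
        rw [if_pos ⟨huv, hxy, rfl⟩]
        simp only [List.headD_cons, if_neg huv', if_neg hxv, pvMax2, pvMin2]
        rw [if_pos (by omega : u ≥ x), if_neg (by omega : ¬ u ≤ x)]
  · -- not a wedge: A returns None, B's guard is false
    rw [get_wedge, if_neg hw]
    congr 1
    rw [pvBWedge.eq_def]
    rw [if_neg]
    rintro ⟨huv, hxy, hlen⟩
    apply hw
    rw [is_wedge_eq_true_iff]
    rw [common_eval u v x y huv] at hlen
    constructor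
    · intro h
      injection h with h1 h2
      subst h1; subst h2
      simp [hxy] at hlen
    · simp only [containsNode, Bool.or_eq_true, decide_eq_true_eq]
      by_cases h1 : u = x ∨ u = y
      · rcases h1 with h | h
        · exact Or.inl (Or.inl h.symm)
        · exact Or.inl (Or.inr h.symm)
      · by_cases h2 : v = x ∨ v = y
        · rcases h2 with h | h
          · exact Or.inr (Or.inl h.symm)
          · exact Or.inr (Or.inr h.symm)
        · exfalso; simp [h1, h2] at hlen

-- the two loop bodies agree step by step
theorem loop_eq (x y : Int) (del : List (Int × Int)) (res : List (Option (Int × Int)))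
    (hpre : ∀ p ∈ res, ∀ e, p = some e → pvWedgeBad (x, y) e = false)
    (seen : PySem.Set (Int × Int)) (diff dtot : Int) (nw : List (Int × Int × Int)) :
    res.foldl (pvAStep (x, y) del) (some (seen, diff, nw)) =
      some ((res.foldl (pvBStep x y (PySem.Dict.counter (pvNodes del))
              (PySem.Dict.counter (pvPairs del)) (PySem.Dict.counter del)) (seen, nw, dtot)).1,
            diff + dtot - (res.foldl (pvBStep x y (PySem.Dict.counter (pvNodes del))
              (PySem.Dict.counter (pvPairs del)) (PySem.Dict.counter del)) (seen, nw, dtot)).2.2,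
            (res.foldl (pvBStep x y (PySem.Dict.counter (pvNodes del))
              (PySem.Dict.counter (pvPairs del)) (PySem.Dict.counter del)) (seen, nw, dtot)).2.1) := by
  induction res generalizing seen diff dtot nw with
  | nil =>
    simp only [List.foldl_nil]
    rw [show diff + dtot - dtot = diff from by ring]
  | cons p res ih =>
    have hpre' : ∀ q ∈ res, ∀ e, q = some e → pvWedgeBad (x, y) e = false := by
      intro q hq e he; exact hpre q (by simp [hq]) e he
    cases p with
    | none =>
      simp only [List.foldl_cons, pvAStep, pvBStep]
      exact ih hpre' seen diff dtot nw
    | some e =>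
      obtain ⟨u, v⟩ := e
      by_cases hseen : PySem.Set.contains seen (u, v) = true
      · simp only [List.foldl_cons, pvAStep, pvBStep, hseen, if_pos]
        exact ih hpre' seen diff dtot nw
      · have hbad := hpre (some (u, v)) (by simp) (u, v) rfl
        have hwe := wedge_eq x y u v hbad
        simp only [List.foldl_cons, pvAStep, pvBStep, hseen, Bool.false_eq_true,
          if_neg, not_false_eq_true]
        rw [share_eq del u v, hwe]
        set s : Int := (if u = v then ((PySem.Dict.counter (pvNodes del)).getD u 0 : Int)
          else (PySem.Dict.counter (pvNodes del)).getD u 0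
            + (PySem.Dict.counter (pvNodes del)).getD v 0
            - (PySem.Dict.counter (pvPairs del)).getD (if u ≤ v then (u, v) else (v, u)) 0)
          - (PySem.Dict.counter del).getD (u, v) 0 with hs
        by_cases hcond : u ≠ v ∧ x ≠ y ∧
            (PySem.Set.inter (PySem.Set.ofList [u, v]) [x, y]).length = 1
        · rw [show pvBWedge x y u v = some
              (pvMax2 (if u = (PySem.Set.inter (PySem.Set.ofList [u, v]) [x, y]).headD 0 then v else u)
                 (if x = (PySem.Set.inter (PySem.Set.ofList [u, v]) [x, y]).headD 0 then y else x),
               (PySem.Set.inter (PySem.Set.ofList [u, v]) [x, y]).headD 0,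
               pvMin2 (if u = (PySem.Set.inter (PySem.Set.ofList [u, v]) [x, y]).headD 0 then v else u)
                 (if x = (PySem.Set.inter (PySem.Set.ofList [u, v]) [x, y]).headD 0 then y else x))
            from by rw [pvBWedge.eq_def, if_pos hcond]]
          rw [if_pos hcond]
          rw [show diff + dtot = (diff - s) + (dtot + s) from by ring]
          exact ih hpre' _ (diff - s) (dtot + s) _
        · rw [show pvBWedge x y u v = none from by rw [pvBWedge.eq_def, if_neg hcond]]
          rw [if_neg hcond]
          rw [show diff + dtot = (diff - s) + (dtot + s) from by ring]
          exact ih hpre' _ (diff - s) (dtot + s) _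

-- ===== VERDICT (by name: the statement is the Claim_ definition above) =====
theorem get_new_wedges_and_diff_spec : Claim_equal_get_new_wedges_and_diff := by
  intro t del res _hdom hpre
  unfold Spec_get_new_wedges_and_diff
  obtain ⟨x, y⟩ := t
  have hpre' : ∀ p ∈ res, ∀ e, p = some e → pvWedgeBad (x, y) e = false := by
    intro p hp e he
    subst he
    unfold Pre_get_new_wedges_and_diff at hpre
    rw [List.all_eq_true] at hpre
    have := hpre (some e) hp
    simpa using this
  rw [get_new_wedges_and_diff, get_new_wedges_and_diff_alt, pvBCountStep_fold]
  simp only [List.nil_append]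
  rw [loop_eq x y del res hpre' _ 0 0 []]
  simp only [PySem.List.len_eq, Prod.mk.injEq]
  exact ⟨trivial, by omega⟩
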